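-- pv_equiv track=rewrite | github.com/dubalom/java_simple_algorithms | validstring.py | only_element
-- ===== SOURCE A (Python) =====
-- def only_element(spisok):
--     array=[]
--     for i in range(len(spisok)):
--         flag=True
--         for j in range (len(spisok)):
--             if flag and spisok[j] == spisok[i] and i!=j:
--                 array.append(spisok[i])
--                 flag=False
--     return len(spisok)!=len(array)
-- ===== SOURCE B (Python) =====
-- def only_element(spisok):
--     counts = {}
--     for x in spisok:
--         counts[x] = counts.get(x, 0) + 1
--     return any(c == 1 for c in counts.values())
-- ===== Notes on version B (the rewrite author's own statement) =====
-- stated objective: faster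
-- what changed: Replaced the O(n^2) nested pairwise scan (with a flag and a marker list) by a single-pass dict of counts followed by a check whether any count equals 1.
import Mathlib
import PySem

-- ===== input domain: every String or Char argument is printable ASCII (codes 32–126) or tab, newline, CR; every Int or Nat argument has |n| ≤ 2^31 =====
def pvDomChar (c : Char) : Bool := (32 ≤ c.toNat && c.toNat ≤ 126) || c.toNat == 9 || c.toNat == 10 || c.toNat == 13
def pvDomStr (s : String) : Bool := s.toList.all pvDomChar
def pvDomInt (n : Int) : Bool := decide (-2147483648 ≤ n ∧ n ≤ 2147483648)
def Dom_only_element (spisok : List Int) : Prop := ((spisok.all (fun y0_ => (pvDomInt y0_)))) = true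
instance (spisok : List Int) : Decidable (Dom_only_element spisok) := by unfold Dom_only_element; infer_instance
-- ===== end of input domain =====

-- B replaces A's O(n^2) nested pairwise scan by a single counting pass over a dict
-- followed by a check whether any count equals 1.

-- ===== PORT A =====
def only_element (spisok : List Int) : Bool :=
  let array : List Int :=
    (PySem.List.pyRange 0 (PySem.List.len spisok) 1).foldl (fun array i =>
      ((PySem.List.pyRange 0 (PySem.List.len spisok) 1).foldl
        (fun (st : List Int × Bool) j =>
          if st.2 && (PySem.List.pyGetD spisok j 0 == PySem.List.pyGetD spisok i 0)
               && !(i == j)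
          then (st.1 ++ [PySem.List.pyGetD spisok i 0], false)
          else st)
        (array, true)).1) []
  !(PySem.List.len spisok == PySem.List.len array)

-- ===== PORT B =====
def only_element_alt (spisok : List Int) : Bool :=
  (PySem.Dict.values
    (spisok.foldl (fun d x => d.insert x (d.getD x 0 + 1))
      (PySem.Dict.empty : PySem.Dict Int Int))).any
    (fun c => c == 1)

-- ===== PRECONDITION & SPEC =====
def Spec_only_element (spisok : List Int) (out : Bool) : Prop := out = only_element_alt spisok
instance (spisok : List Int) (out : Bool) : Decidable (Spec_only_element spisok out) := by unfold Spec_only_element; infer_instance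

-- ===== CLAIM (what is proved, stated in full; the proofs are below) =====
def Claim_equal_only_element : Prop := ∀ (spisok : List Int), Dom_only_element spisok → Spec_only_element spisok (only_element spisok)

-- ===== LEMMAS AND PROOFS =====

-- A's inner loop once flag is False: nothing changes.
theorem inner_false (a b : Int → Bool) (v : Int) (l : List Int) (arr : List Int) :
    l.foldl (fun (st : List Int × Bool) j =>
        if st.2 && a j && b j then (st.1 ++ [v], false) else st) (arr, false) = (arr, false) := by
  induction l with
  | nil => rfl
  | cons h t ih => simpa using ih

-- A's inner loop from flag = True: appends v once iff some j satisfies both tests.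
theorem inner_spec (a b : Int → Bool) (v : Int) (l : List Int) (arr : List Int) :
    l.foldl (fun (st : List Int × Bool) j =>
        if st.2 && a j && b j then (st.1 ++ [v], false) else st) (arr, true)
      = if l.any (fun j => a j && b j) then (arr ++ [v], false) else (arr, true) := by
  induction l generalizing arr with
  | nil => rfl
  | cons h t ih =>
    rw [List.foldl_cons, List.any_cons]
    by_cases hab : (a h && b h) = true
    · rw [if_pos (by simp [hab]), inner_false, hab, Bool.true_or, if_pos rfl]
    · rw [if_neg (by simpa using hab), ih]
      have hab' : (a h && b h) = false := by simpa using hab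
      rw [hab', Bool.false_or]

-- two distinct members force length ≥ 2
theorem two_mem_length {α : Type} (l : List α) (x y : α) (hx : x ∈ l) (hy : y ∈ l)
    (hne : x ≠ y) : 2 ≤ l.length := by
  match l with
  | [] => simp at hx
  | [z] =>
    simp at hx hy; subst hx; subst hy; exact absurd rfl hne
  | z :: w :: t => simp

-- a Nodup list whose q-filter can only contain i, with i a q-member, filters to [i]
theorem filter_eq_singleton {α : Type} (l : List α) (q : α → Bool) (i : α)
    (hnd : l.Nodup) (hi : i ∈ l) (hqi : q i = true)
    (hall : ∀ j ∈ l, q j = true → j = i) : l.filter q = [i] := by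
  have hmem : i ∈ l.filter q := List.mem_filter.mpr ⟨hi, hqi⟩
  have hsub : ∀ x ∈ l.filter q, x = i := fun x hx =>
    hall x (List.mem_filter.mp hx).1 (List.mem_filter.mp hx).2
  have hnd' : (l.filter q).Nodup := hnd.filter q
  cases hfe : l.filter q with
  | nil => rw [hfe] at hmem; simp at hmem
  | cons c t =>
    have hc : c = i := hsub c (by rw [hfe]; exact List.mem_cons_self)
    have ht : t = [] := by
      cases t with
      | nil => rfl
      | cons d u =>
        have hd : d = i := hsub d (by rw [hfe]; simp)
        rw [hfe, hc, hd] at hnd'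
        simp at hnd'
    rw [hc, ht]

-- per-index: "no other equal index exists" is exactly "the value occurs once"
theorem not_dup_iff (xs : List Int) (i : Int)
    (hi : i ∈ PySem.List.pyRange 0 (PySem.List.len xs) 1) :
    (¬ ((PySem.List.pyRange 0 (PySem.List.len xs) 1).any
        (fun j => (PySem.List.pyGetD xs j 0 == PySem.List.pyGetD xs i 0) && !(i == j)) = true))
      ↔ xs.count (PySem.List.pyGetD xs i 0) = 1 := by
  have hcount : ∀ v : Int, xs.count v
      = (PySem.List.pyRange 0 (PySem.List.len xs) 1).countP
          (fun j => PySem.List.pyGetD xs j 0 == v) := by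
    intro v
    conv_lhs => rw [← PySem.List.map_pyGetD_pyRange_zero (xs := xs) (d := 0)]
    rw [List.count_eq_countP, List.countP_map]
    rfl
  rw [hcount (PySem.List.pyGetD xs i 0), List.countP_eq_length_filter]
  have hnd := PySem.List.nodup_pyRange_one (a := 0) (b := PySem.List.len xs)
  have hqi : (PySem.List.pyGetD xs i 0 == PySem.List.pyGetD xs i 0) = true := beq_self_eq_true _
  constructor
  · intro hno
    rw [filter_eq_singleton _ _ i hnd hi hqi ?_]
    · rfl
    · intro j hj hqj
      by_contra hne
      exact hno (List.any_eq_true.mpr ⟨j, hj, by simp [hqj]; exact fun h => hne h.symm⟩)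
  · intro hone hany
    obtain ⟨j, hj, hcond⟩ := List.any_eq_true.mp hany
    have hcond' : PySem.List.pyGetD xs j 0 = PySem.List.pyGetD xs i 0 ∧ ¬ i = j := by
      simpa using hcond
    have hqj : (PySem.List.pyGetD xs j 0 == PySem.List.pyGetD xs i 0) = true :=
      beq_iff_eq.mpr hcond'.1
    have hji : j ≠ i := fun h => hcond'.2 h.symm
    have hif : i ∈ (PySem.List.pyRange 0 (PySem.List.len xs) 1).filter
        (fun j => PySem.List.pyGetD xs j 0 == PySem.List.pyGetD xs i 0) :=
      List.mem_filter.mpr ⟨hi, hqi⟩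
    have hjf : j ∈ (PySem.List.pyRange 0 (PySem.List.len xs) 1).filter
        (fun j => PySem.List.pyGetD xs j 0 == PySem.List.pyGetD xs i 0) :=
      List.mem_filter.mpr ⟨hj, hqj⟩
    have := two_mem_length _ _ _ hjf hif hji
    omega

-- A's result characterised
theorem only_element_eq_exists (xs : List Int) :
    only_element xs = decide (∃ v ∈ xs, xs.count v = 1) := by
  unfold only_element
  simp only [inner_spec, apply_ite (Prod.fst (α := List Int) (β := Bool))]
  rw [PySem.List.foldl_append_if]
  rw [Bool.eq_iff_iff]
  simp only [Bool.not_eq_true', beq_eq_false_iff_ne, ne_eq, decide_eq_true_eq,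
    PySem.List.len_eq, List.nil_append, List.length_map, Nat.cast_inj]
  have hlen : (PySem.List.pyRange 0 ((xs.length : Int)) 1).length = xs.length := by
    simp [PySem.List.length_pyRange_one]
  constructor
  · intro hne
    have : ¬ ((PySem.List.pyRange 0 ((xs.length : Int)) 1).filter
        (fun i => (PySem.List.pyRange 0 ((xs.length : Int)) 1).any
          (fun j => (PySem.List.pyGetD xs j 0 == PySem.List.pyGetD xs i 0) && !(i == j)))).length
        = (PySem.List.pyRange 0 ((xs.length : Int)) 1).length := by
      rw [hlen]; exact fun h => hne h.symm
    rw [List.length_filter_eq_length_iff] at this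
    push Not at this
    obtain ⟨i, hi, hnot⟩ := this
    have hi' : i ∈ PySem.List.pyRange 0 (PySem.List.len xs) 1 := by
      simpa [PySem.List.len_eq] using hi
    have hcnt := (not_dup_iff xs i hi').mp (by simpa [PySem.List.len_eq] using hnot)
    refine ⟨PySem.List.pyGetD xs i 0, ?_, hcnt⟩
    have hmm : PySem.List.pyGetD xs i 0
        ∈ (PySem.List.pyRange 0 (PySem.List.len xs) 1).map (fun j => PySem.List.pyGetD xs j 0) :=
      List.mem_map_of_mem hi'
    rw [PySem.List.map_pyGetD_pyRange_zero] at hmm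
    exact hmm
  · intro hex heq
    obtain ⟨v, hv, hcnt⟩ := hex
    rw [← PySem.List.map_pyGetD_pyRange_zero (xs := xs) (d := 0)] at hv
    obtain ⟨i, hi, hgi⟩ := List.mem_map.mp hv
    have hi' : i ∈ PySem.List.pyRange 0 (PySem.List.len xs) 1 := by
      simpa [PySem.List.len_eq] using hi
    have hall : ∀ a ∈ PySem.List.pyRange 0 ((xs.length : Int)) 1,
        ((PySem.List.pyRange 0 ((xs.length : Int)) 1).any
          (fun j => (PySem.List.pyGetD xs j 0 == PySem.List.pyGetD xs a 0) && !(a == j))) = true := by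
      rw [← List.length_filter_eq_length_iff, hlen]
      exact heq.symm
    have hP := hall i hi
    have : ¬ ((PySem.List.pyRange 0 (PySem.List.len xs) 1).any
        (fun j => (PySem.List.pyGetD xs j 0 == PySem.List.pyGetD xs i 0) && !(i == j)) = true) := by
      rw [not_dup_iff xs i hi', hgi]
      exact hcnt
    exact this (by simpa [PySem.List.len_eq] using hP)

-- B's result characterised
theorem only_element_alt_eq_exists (xs : List Int) :
    only_element_alt xs = decide (∃ v ∈ xs, xs.count v = 1) := by
  unfold only_element_alt
  have hnd : ((xs.foldl (fun d x => d.insert x (d.getD x 0 + 1)) PySem.Dict.empty)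
      : PySem.Dict Int Int).keys.Nodup :=
    PySem.Dict.nodup_keys_foldl_insert xs _ PySem.Dict.empty (by simp)
  have hkeys : ∀ k : Int, k ∈ ((xs.foldl (fun d x => d.insert x (d.getD x 0 + 1)) PySem.Dict.empty)
      : PySem.Dict Int Int).keys ↔ k ∈ xs := by
    intro k
    rw [PySem.Dict.keys_foldl_insert]
    simp [PySem.Set.mem_update]
  have hget : ∀ k : Int, ((xs.foldl (fun d x => d.insert x (d.getD x 0 + 1)) PySem.Dict.empty)
      : PySem.Dict Int Int).getD k 0 = (xs.count k : Int) := by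
    intro k
    rw [PySem.Dict.getD_foldl_insert_add_one]
    simp
  rw [PySem.Dict.values_eq_map_keys _ hnd 0, Bool.eq_iff_iff]
  simp only [List.any_map, List.any_eq_true, Function.comp, decide_eq_true_eq]
  constructor
  · rintro ⟨k, hk, hv⟩
    refine ⟨k, (hkeys k).mp hk, ?_⟩
    rw [hget k] at hv
    simpa using hv
  · rintro ⟨v, hv, hc⟩
    refine ⟨v, (hkeys v).mpr hv, ?_⟩
    rw [hget v]
    simp [hc]

-- ===== VERDICT (by name: the statement is the Claim_ definition above) =====
theorem only_element_spec : Claim_equal_only_element := by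
  intro spisok _
  unfold Spec_only_element
  rw [only_element_eq_exists, only_element_alt_eq_exists]
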